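-- pv_equiv track=rewrite | github.com/MatiPl01/Wstep-do-Informatyki | Ćwiczenia/3. Zajęcia/Zadanie10/Program1.py | longest_consistent_arithmetic_substring
-- ===== SOURCE A (Python) =====
-- def longest_consistent_arithmetic_substring(seq):
--     if len(seq) < 2:
--         return 0
--     max_length = curr_length = 2
--     r = seq[1] - seq[0]
--     for i in range(2, len(seq)):
--         curr_r = seq[i] - seq[i-1]
--         if curr_r == r:
--             curr_length += 1
--             if curr_length > max_length:
--                 max_length = curr_length
--         else:
--             r = curr_r
--             curr_length = 2
--     return max_length
-- ===== SOURCE B (Python) =====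
-- def longest_consistent_arithmetic_substring(seq):
--     n = len(seq)
--     if n < 2:
--         return 0
--     cuts = [0] + [i for i in range(1, n - 1)
--                   if seq[i + 1] - seq[i] != seq[i] - seq[i - 1]] + [n - 1]
--     return max(b - a for a, b in zip(cuts, cuts[1:])) + 1
-- ===== Notes on version B (the rewrite author's own statement) =====
-- stated objective: alternative
-- what changed: A is a fused state machine carrying (max_length, curr_length, r) per element; B instead computes the list of breakpoint indices where the consecutive difference changes (a filtered index comprehension), brackets it with 0 and n-1, and returns the maximum gap between adjacent breakpoints plus 1 - no running length counter and no difference register are maintained.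
import Mathlib
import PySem

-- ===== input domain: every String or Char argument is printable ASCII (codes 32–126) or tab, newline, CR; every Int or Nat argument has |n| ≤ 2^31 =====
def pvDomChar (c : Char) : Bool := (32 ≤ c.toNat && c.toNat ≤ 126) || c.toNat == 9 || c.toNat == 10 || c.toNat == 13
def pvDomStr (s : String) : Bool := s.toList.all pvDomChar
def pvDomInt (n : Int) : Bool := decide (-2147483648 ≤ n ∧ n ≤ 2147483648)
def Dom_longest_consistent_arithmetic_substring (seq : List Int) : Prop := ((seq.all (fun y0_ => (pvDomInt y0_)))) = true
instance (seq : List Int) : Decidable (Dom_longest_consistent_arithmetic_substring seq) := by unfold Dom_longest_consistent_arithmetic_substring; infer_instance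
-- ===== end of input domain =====

-- B replaces A's fused state machine (running length counters plus a difference register) by a
-- breakpoint decomposition: collect the indices where the consecutive difference changes, bracket
-- them with 0 and n-1, and return the maximum gap between adjacent breakpoints plus 1.

-- ===== PORT A =====
-- the body of A's for-loop over i in range(2, len(seq)); state = (max_length, curr_length, r)
def pvAStep (seq : List Int) (st : Int × Int × Int) (i : Int) : Int × Int × Int :=
  let currR := PySem.List.pyGetD seq i 0 - PySem.List.pyGetD seq (i-1) 0
  if currR == st.2.2 then
    let curL := st.2.1 + 1
    if curL > st.1 then (curL, curL, st.2.2) else (st.1, curL, st.2.2)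
  else (st.1, 2, currR)

def longest_consistent_arithmetic_substring (seq : List Int) : Int :=
  if seq.length < 2 then 0
  else
    ((PySem.List.pyRange 2 (seq.length : Int) 1).foldl (pvAStep seq)
      (2, 2, PySem.List.pyGetD seq 1 0 - PySem.List.pyGetD seq 0 0)).1

-- ===== PORT B =====
-- the filter condition of B's index comprehension: seq[i+1]-seq[i] != seq[i]-seq[i-1]
def pvCond (seq : List Int) (i : Int) : Bool :=
  PySem.List.pyGetD seq (i+1) 0 - PySem.List.pyGetD seq i 0
    != PySem.List.pyGetD seq i 0 - PySem.List.pyGetD seq (i-1) 0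

def longest_consistent_arithmetic_substring_alt (seq : List Int) : Int :=
  let n : Int := (seq.length : Int)
  if seq.length < 2 then 0
  else
    let cuts : List Int :=
      [0] ++ (PySem.List.pyRange 1 (n - 1) 1).filter (pvCond seq) ++ [n - 1]
    match PySem.List.max?
        ((cuts.zip (PySem.List.slice cuts (some 1) none)).map (fun p => p.2 - p.1))
        (fun y => y) with
    | some m => m + 1
    | none => 0  -- unreachable: cuts always has at least two elements

-- ===== PRECONDITION & SPEC =====
def Spec_longest_consistent_arithmetic_substring (seq : List Int) (out : Int) : Prop := out = longest_consistent_arithmetic_substring_alt seq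
instance (seq : List Int) (out : Int) : Decidable (Spec_longest_consistent_arithmetic_substring seq out) := by unfold Spec_longest_consistent_arithmetic_substring; infer_instance

-- ===== CLAIM (what is proved, stated in full; the proofs are below) =====
def Claim_equal_longest_consistent_arithmetic_substring : Prop := ∀ (seq : List Int), Dom_longest_consistent_arithmetic_substring seq → Spec_longest_consistent_arithmetic_substring seq (longest_consistent_arithmetic_substring seq)

-- ===== LEMMAS AND PROOFS =====

-- the list of consecutive differences of seq (seq[1:] is seq.tail)
def pvDiffs (seq : List Int) : List Int :=
  (seq.zip seq.tail).map (fun p => p.2 - p.1)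

-- reference run scan over the difference list: state = (best, run)
def pvBStep (st : Int × Int) (pd : Int × Int) : Int × Int :=
  let run := if pd.2 == pd.1 then st.2 + 1 else 1
  if run > st.1 then (run, run) else (st.1, run)

-- run lengths of the maximal blocks of equal elements of d :: ds, current count k
def pvRL (d k : Int) : List Int → List Int
  | [] => [k]
  | e :: es => if e = d then pvRL e (k+1) es else k :: pvRL e 1 es

-- breakpoint positions of d :: ds (current position p): indices where the value changes
def pvCP (d p : Int) : List Int → List Int
  | [] => []
  | e :: es => if e = d then pvCP e (p+1) es else p :: pvCP e (p+1) es

-- gaps between consecutive elements of c0 :: cs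
def pvG (c0 : Int) : List Int → List Int
  | [] => []
  | c :: cs => (c - c0) :: pvG c cs

-- max of a nonempty list (0 on [])
def pvMax : List Int → Int
  | [] => 0
  | x :: xs => xs.foldl max x

lemma pvDiffs_cons (x y : Int) (rest : List Int) :
    pvDiffs (x :: y :: rest) = (y - x) :: pvDiffs (y :: rest) := rfl

lemma pvDiffs_length (y : Int) (rest : List Int) :
    (pvDiffs (y :: rest)).length = rest.length := by
  simp [pvDiffs]

lemma pvAStep_eq (seq : List Int) (maxL curL r i : Int) :
    pvAStep seq (maxL, curL, r) i =
      if PySem.List.pyGetD seq i 0 - PySem.List.pyGetD seq (i-1) 0 = r then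
        (if curL + 1 > maxL then (curL + 1, curL + 1, r) else (maxL, curL + 1, r))
      else (maxL, 2, PySem.List.pyGetD seq i 0 - PySem.List.pyGetD seq (i-1) 0) := by
  simp [pvAStep]

lemma pvBStep_eq (best run prev d : Int) :
    pvBStep (best, run) (prev, d) =
      if d = prev then (if run + 1 > best then (run + 1, run + 1) else (best, run + 1))
      else (if 1 > best then (1, 1) else (best, 1)) := by
  by_cases h : d = prev <;> simp [pvBStep, h]

lemma pyGetD_cons_succ (x : Int) (xs : List Int) (i : Int) (d : Int) (h : 0 ≤ i) :
    PySem.List.pyGetD (x :: xs) (i + 1) d = PySem.List.pyGetD xs i d := by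
  obtain ⟨n, rfl⟩ := Int.eq_ofNat_of_zero_le h
  have hc : ((n : Int) + 1) = ((n + 1 : Nat) : Int) := by push_cast; ring
  rw [hc, PySem.List.pyGetD_natCast, PySem.List.pyGetD_natCast]
  rfl

-- dropping the head of seq shifts A's index loop down by one (indices ≥ 1 on the tail)
lemma foldA_shift (x : Int) (xs : List Int) (m : Nat) : ∀ (a : Int), 1 ≤ a →
    ∀ st : Int × Int × Int,
    List.foldl (pvAStep (x :: xs)) st (PySem.List.pyRange (a + 1) (a + 1 + (m : Int)) 1)
    = List.foldl (pvAStep xs) st (PySem.List.pyRange a (a + (m : Int)) 1) := by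
  induction m with
  | zero =>
    intro a ha st
    rw [PySem.List.pyRange_one_eq_nil (by omega), PySem.List.pyRange_one_eq_nil (by omega)]
    rfl
  | succ m ih =>
    intro a ha st
    rw [PySem.List.pyRange_one_cons (by push_cast; omega),
        PySem.List.pyRange_one_cons (a := a) (b := a + ((m + 1 : Nat) : Int)) (by push_cast; omega)]
    simp only [List.foldl_cons]
    have e1 : PySem.List.pyGetD (x :: xs) (a + 1) 0 = PySem.List.pyGetD xs a 0 :=
      pyGetD_cons_succ x xs a 0 (by omega)
    have e2 : PySem.List.pyGetD (x :: xs) (a + 1 - 1) 0 = PySem.List.pyGetD xs (a - 1) 0 := by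
      rw [show a + 1 - 1 = (a - 1) + 1 by ring]
      exact pyGetD_cons_succ x xs (a - 1) 0 (by omega)
    have hstep : pvAStep (x :: xs) st (a + 1) = pvAStep xs st a := by
      simp only [pvAStep, e1, e2]
    rw [hstep]
    have b1 : a + 1 + ((m + 1 : Nat) : Int) = (a + 1) + 1 + (m : Int) := by push_cast; ring
    have b2 : a + ((m + 1 : Nat) : Int) = (a + 1) + (m : Int) := by push_cast; ring
    rw [b1, b2]
    exact ih (a + 1) (by omega) _

-- A's fold from index 2 carrying r = previous difference equals the run scan
-- over adjacent pairs of the difference list (offset by one in both counters)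
lemma main_corr (rest : List Int) : ∀ (x y best run : Int), 1 ≤ best →
    (List.foldl (pvAStep (x :: y :: rest)) (best + 1, run + 1, y - x)
        (PySem.List.pyRange 2 (2 + (rest.length : Int)) 1)).1
    = (List.foldl pvBStep (best, run)
        ((pvDiffs (x :: y :: rest)).zip (pvDiffs (y :: rest)))).1 + 1 := by
  induction rest with
  | nil =>
    intro x y best run hb
    rw [PySem.List.pyRange_one_eq_nil (by norm_num)]
    simp [pvDiffs]
  | cons z rest ih =>
    intro x y best run hb
    rw [PySem.List.pyRange_one_cons (by simp only [List.length_cons]; push_cast; omega)]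
    simp only [List.foldl_cons]
    have g2 : PySem.List.pyGetD (x :: y :: z :: rest) 2 0 = z := by
      rw [show (2 : Int) = ((2 : Nat) : Int) from rfl, PySem.List.pyGetD_natCast]; rfl
    have g1 : PySem.List.pyGetD (x :: y :: z :: rest) (2 - 1) 0 = y := by
      rw [show (2 : Int) - 1 = ((1 : Nat) : Int) by norm_num, PySem.List.pyGetD_natCast]; rfl
    rw [pvDiffs_cons x y (z :: rest), pvDiffs_cons y z rest]
    simp only [List.zip_cons_cons, List.foldl_cons]
    rw [pvAStep_eq, pvBStep_eq, g2, g1]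
    have hshift : ∀ st : Int × Int × Int,
        List.foldl (pvAStep (x :: y :: z :: rest)) st
          (PySem.List.pyRange (2 + 1) (2 + (((z :: rest).length : Nat) : Int)) 1)
        = List.foldl (pvAStep (y :: z :: rest)) st
          (PySem.List.pyRange 2 (2 + ((rest.length : Nat) : Int)) 1) := by
      intro st
      rw [show (2 : Int) + (((z :: rest).length : Nat) : Int) = 2 + 1 + ((rest.length : Nat) : Int)
            by simp only [List.length_cons]; push_cast; omega,
          foldA_shift x (y :: z :: rest) rest.length 2 (by omega)]
    rw [hshift]
    by_cases hzy : z - y = y - x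
    · rw [if_pos hzy, if_pos hzy]
      by_cases hgt : run + 1 > best
      · rw [if_pos (show run + 1 + 1 > best + 1 by omega), if_pos hgt, ← hzy]
        have := ih y z (run + 1) (run + 1) (by omega)
        rw [pvDiffs_cons y z rest] at this
        exact this
      · rw [if_neg (show ¬ (run + 1 + 1 > best + 1) by omega), if_neg hgt, ← hzy]
        have := ih y z best (run + 1) hb
        rw [pvDiffs_cons y z rest] at this
        exact this
    · rw [if_neg hzy, if_neg hzy, if_neg (show ¬ ((1 : Int) > best) by omega)]
      have := ih y z best 1 hb
      rw [pvDiffs_cons y z rest, show (1 : Int) + 1 = 2 by norm_num] at this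
      exact this

-- ===== second half: B's breakpoint computation equals the run scan =====

-- fold max commutes with a max in the seed
lemma foldl_max_seed (xs : List Int) : ∀ (a b : Int),
    xs.foldl max (max a b) = max a (xs.foldl max b) := by
  induction xs with
  | nil => intro a b; rfl
  | cons x xs ih =>
    intro a b
    simp only [List.foldl_cons]
    rw [max_assoc, ih]

lemma pvRL_ne_nil (ds : List Int) : ∀ (d k : Int), pvRL d k ds ≠ [] := by
  induction ds with
  | nil => intro d k; simp [pvRL]
  | cons e es ih => intro d k; by_cases h : e = d <;> simp [pvRL, h, ih]

lemma pvMax_cons (l : List Int) (x : Int) (h : l ≠ []) :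
    pvMax (x :: l) = max x (pvMax l) := by
  cases l with
  | nil => exact absurd rfl h
  | cons r rs =>
    show (r :: rs).foldl max x = max x (rs.foldl max r)
    simp only [List.foldl_cons]
    exact foldl_max_seed rs x r

-- the max of the run lengths starting at count k is at least k
lemma pvRL_ge (ds : List Int) : ∀ (d k : Int), k ≤ pvMax (pvRL d k ds) := by
  induction ds with
  | nil => intro d k; simp [pvRL, pvMax]
  | cons e es ih =>
    intro d k
    by_cases h : e = d
    · rw [pvRL, if_pos h]
      exact le_trans (by omega) (ih e (k+1))
    · rw [pvRL, if_neg h, pvMax_cons _ k (pvRL_ne_nil es e 1)]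
      exact le_max_left k _

-- the run scan over the pairs (d,e1),(e1,e2),... equals best max the max of the run lengths
lemma runscan_eq_rl (ds : List Int) : ∀ (d best run : Int), 1 ≤ run → run ≤ best →
    (List.foldl pvBStep (best, run) ((d :: ds).zip ds)).1
      = max best (pvMax (pvRL d run ds)) := by
  induction ds with
  | nil =>
    intro d best run h1 h2
    simp only [List.zip_nil_right, List.foldl_nil, pvRL, pvMax, List.foldl_nil]
    omega
  | cons e es ih =>
    intro d best run h1 h2
    simp only [List.zip_cons_cons, List.foldl_cons]
    rw [pvBStep_eq]
    by_cases h : e = d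
    · rw [if_pos h, pvRL, if_pos h]
      by_cases hgt : run + 1 > best
      · rw [if_pos hgt, ih e (run + 1) (run + 1) (by omega) le_rfl]
        have hX := pvRL_ge es e (run + 1)
        rw [max_eq_right hX, max_eq_right (le_trans (by omega) hX)]
      · rw [if_neg hgt]
        exact ih e best (run + 1) (by omega) (by omega)
    · rw [if_neg h, if_neg (show ¬ ((1:Int) > best) by omega), pvRL, if_neg h,
          ih e best 1 le_rfl (by omega), pvMax_cons _ run (pvRL_ne_nil es e 1),
          ← max_assoc, max_eq_left h2]

-- breakpoints shift with the position seed
lemma pvCP_shift (l : List Int) : ∀ (d p : Int),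
    pvCP d (p + 1) l = (pvCP d p l).map (· + 1) := by
  induction l with
  | nil => intro d p; rfl
  | cons e es ih =>
    intro d p
    by_cases h : e = d <;> simp [pvCP, h, ih _ (p+1)]

-- gaps of (breakpoints ++ [end]) from a last cut c0 are exactly the run lengths
lemma pvG_cp (ds : List Int) : ∀ (d p c0 : Int),
    pvG c0 (pvCP d p ds ++ [p + (ds.length : Int)]) = pvRL d (p - c0) ds := by
  induction ds with
  | nil => intro d p c0; simp [pvCP, pvG, pvRL]
  | cons e es ih =>
    intro d p c0
    by_cases h : e = d
    · rw [pvCP, if_pos h, pvRL, if_pos h,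
          show p + ((e :: es).length : Int) = (p + 1) + (es.length : Int) by
            simp only [List.length_cons]; push_cast; ring,
          ih e (p+1) c0, show p + 1 - c0 = p - c0 + 1 by ring]
    · rw [pvCP, if_neg h, pvRL, if_neg h]
      simp only [List.cons_append, pvG]
      rw [show p + ((e :: es).length : Int) = (p + 1) + (es.length : Int) by
            simp only [List.length_cons]; push_cast; ring,
          ih e (p+1) p, show p + 1 - p = (1:Int) by ring]

-- the mapped zip of a cuts list with its tail is pvG
lemma zip_map_eq_pvG (t : List Int) : ∀ (c0 : Int),
    (((c0 :: t).zip (PySem.List.slice (c0 :: t) (some 1) none)).map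
        (fun p => p.2 - p.1)) = pvG c0 t := by
  induction t with
  | nil => intro c0; rfl
  | cons c cs ih =>
    intro c0
    rw [PySem.List.slice_from_one]
    show (((c0 :: c :: cs).zip (c :: cs)).map (fun p => p.2 - p.1)) = pvG c0 (c :: cs)
    simp only [List.zip_cons_cons, List.map_cons, pvG]
    congr 1
    have := ih c
    rw [PySem.List.slice_from_one] at this
    exact this

-- the index filter over seq equals the structural breakpoint computation over the diffs,
-- shifted down one position when the head of seq is dropped
lemma filt_shift (x : Int) (xs : List Int) (m : Nat) : ∀ (a : Int), 1 ≤ a →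
    (PySem.List.pyRange (a + 1) (a + 1 + (m : Int)) 1).filter (pvCond (x :: xs))
    = ((PySem.List.pyRange a (a + (m : Int)) 1).filter (pvCond xs)).map (· + 1) := by
  induction m with
  | zero =>
    intro a ha
    rw [PySem.List.pyRange_one_eq_nil (by omega), PySem.List.pyRange_one_eq_nil (by omega)]
    rfl
  | succ m ih =>
    intro a ha
    rw [PySem.List.pyRange_one_cons (by push_cast; omega),
        PySem.List.pyRange_one_cons (a := a) (b := a + ((m + 1 : Nat) : Int)) (by push_cast; omega)]
    have e1 : PySem.List.pyGetD (x :: xs) (a + 1 + 1) 0 = PySem.List.pyGetD xs (a + 1) 0 :=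
      pyGetD_cons_succ x xs (a + 1) 0 (by omega)
    have e2 : PySem.List.pyGetD (x :: xs) (a + 1) 0 = PySem.List.pyGetD xs a 0 :=
      pyGetD_cons_succ x xs a 0 (by omega)
    have e3 : PySem.List.pyGetD (x :: xs) (a + 1 - 1) 0 = PySem.List.pyGetD xs (a - 1) 0 := by
      rw [show a + 1 - 1 = (a - 1) + 1 by ring]
      exact pyGetD_cons_succ x xs (a - 1) 0 (by omega)
    have hc : pvCond (x :: xs) (a + 1) = pvCond xs a := by
      simp only [pvCond, e1, e2, e3]
    have b1 : a + 1 + ((m + 1 : Nat) : Int) = (a + 1) + 1 + (m : Int) := by push_cast; ring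
    have b2 : a + ((m + 1 : Nat) : Int) = (a + 1) + (m : Int) := by push_cast; ring
    rw [List.filter_cons, List.filter_cons, hc, b1, b2, ih (a + 1) (by omega)]
    by_cases h : pvCond xs a = true <;> simp [h]

-- the index comprehension over seq = x :: y :: rest computes the breakpoints of the diffs
lemma filt_eq_cp (rest : List Int) : ∀ (x y : Int),
    (PySem.List.pyRange 1 (1 + (rest.length : Int)) 1).filter (pvCond (x :: y :: rest))
    = pvCP (y - x) 1 (pvDiffs (y :: rest)) := by
  induction rest with
  | nil =>
    intro x y
    rw [PySem.List.pyRange_one_eq_nil (by norm_num)]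
    rfl
  | cons z rest ih =>
    intro x y
    rw [PySem.List.pyRange_one_cons
          (by simp only [List.length_cons]; push_cast; omega)]
    have g2 : PySem.List.pyGetD (x :: y :: z :: rest) 2 0 = z := by
      rw [show (2 : Int) = ((2 : Nat) : Int) from rfl, PySem.List.pyGetD_natCast]; rfl
    have g1 : PySem.List.pyGetD (x :: y :: z :: rest) 1 0 = y := by
      rw [show (1 : Int) = ((1 : Nat) : Int) from rfl, PySem.List.pyGetD_natCast]; rfl
    have hc : pvCond (x :: y :: z :: rest) 1 = !decide (z - y = y - x) := by
      simp [pvCond, g1]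
      rw [g2]
      rfl
    have htail : (PySem.List.pyRange (1 + 1) (1 + ((z :: rest).length : Int)) 1).filter
          (pvCond (x :: y :: z :: rest))
        = ((PySem.List.pyRange 1 (1 + (rest.length : Int)) 1).filter
            (pvCond (y :: z :: rest))).map (· + 1) := by
      rw [show (1 : Int) + ((z :: rest).length : Int) = 1 + 1 + (rest.length : Int) by
            simp only [List.length_cons]; push_cast; ring]
      exact filt_shift x (y :: z :: rest) rest.length 1 le_rfl
    rw [List.filter_cons, hc, htail, ih y z, ← pvCP_shift]
    rw [pvDiffs_cons y z rest, pvCP]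
    by_cases h : z - y = y - x <;> simp [h]

-- ===== VERDICT (by name: the statement is the Claim_ definition above) =====
theorem longest_consistent_arithmetic_substring_spec : Claim_equal_longest_consistent_arithmetic_substring := by
  intro seq _
  unfold Spec_longest_consistent_arithmetic_substring
  unfold longest_consistent_arithmetic_substring longest_consistent_arithmetic_substring_alt
  match seq with
  | [] => rfl
  | [x] => rfl
  | x :: y :: rest =>
    rw [if_neg (by simp : ¬ ((x :: y :: rest).length < 2)),
        if_neg (by simp : ¬ ((x :: y :: rest).length < 2))]
    have h1 : PySem.List.pyGetD (x :: y :: rest) 1 0 = y := by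
      rw [show (1 : Int) = ((1 : Nat) : Int) from rfl, PySem.List.pyGetD_natCast]; rfl
    have h0 : PySem.List.pyGetD (x :: y :: rest) 0 0 = x := PySem.List.pyGetD_zero_cons x _ 0
    have hlen : (((x :: y :: rest).length : Nat) : Int) = 2 + ((rest.length : Nat) : Int) := by
      simp only [List.length_cons]; push_cast; omega
    -- left side: A's fold reduces to the run scan, then to the max of the run lengths
    rw [h1, h0, hlen, show ((2:Int), (2:Int), y - x) = ((1:Int) + 1, (1:Int) + 1, y - x) from rfl,
        main_corr rest x y 1 1 (by norm_num), pvDiffs_cons x y rest]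
    rw [runscan_eq_rl (pvDiffs (y :: rest)) (y - x) 1 1 le_rfl le_rfl,
        max_eq_right (le_trans (by norm_num) (pvRL_ge (pvDiffs (y :: rest)) (y - x) 1))]
    -- right side: the cuts, their gaps, and the max
    have hbound : (2 : Int) + ((rest.length : Nat) : Int) - 1 = 1 + ((rest.length : Nat) : Int) := by
      ring
    rw [hbound, filt_eq_cp rest x y]
    have hcuts : ([(0:Int)] ++ pvCP (y - x) 1 (pvDiffs (y :: rest)) ++ [1 + ((rest.length : Nat) : Int)])
        = (0 : Int) :: (pvCP (y - x) 1 (pvDiffs (y :: rest))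
            ++ [1 + (((pvDiffs (y :: rest)).length : Nat) : Int)]) := by
      rw [pvDiffs_length]; rfl
    rw [hcuts]
    have hz := zip_map_eq_pvG
      (pvCP (y - x) 1 (pvDiffs (y :: rest)) ++ [1 + (((pvDiffs (y :: rest)).length : Nat) : Int)]) 0
    simp only [hz, pvG_cp (pvDiffs (y :: rest)) (y - x) 1 0, show (1 : Int) - 0 = 1 by ring]
    cases hrl : pvRL (y - x) 1 (pvDiffs (y :: rest)) with
    | nil => exact absurd hrl (pvRL_ne_nil _ _ _)
    | cons r rs =>
      rw [PySem.List.max?_id_cons]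
      rfl
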